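-- pv_equiv track=rewrite | github.com/UGeunJi/Coding_Test_Practice | baekjoon/Bronze - 3/[25801].py | odd_even_strings
-- ===== SOURCE A (Python) =====
-- from collections import Counter
--
-- def odd_even_strings(string):
--     even_check, odd_check = 0, 0
--
--     answer = "0/1"
--
--     cnt_items = Counter(string).items()
--
--     for item in cnt_items:
--         if item[1] % 2 == 0:
--             even_check += 1
--         elif item[1] % 2 == 1:
--             odd_check += 1
--
--     if even_check > 0 and odd_check == 0:
--         answer = "0"
--     elif even_check == 0 and odd_check > 0:
--         answer = "1"
--
--     return answer
-- ===== SOURCE B (Python) =====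
-- def odd_even_strings(string):
--     odd = set()
--     for ch in string:
--         if ch in odd:
--             odd.remove(ch)
--         else:
--             odd.add(ch)
--     distinct = set(string)
--     if distinct and not odd:
--         return "0"
--     if distinct and odd == distinct:
--         return "1"
--     return "0/1"
-- ===== Notes on version B (the rewrite author's own statement) =====
-- stated objective: idiomatic
-- what changed: Replaces the Counter frequency table plus a separate classification loop over its items by a single pass that toggles a parity set (characters seen an odd number of times so far), then compares that set with set(string).
import Mathlib
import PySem

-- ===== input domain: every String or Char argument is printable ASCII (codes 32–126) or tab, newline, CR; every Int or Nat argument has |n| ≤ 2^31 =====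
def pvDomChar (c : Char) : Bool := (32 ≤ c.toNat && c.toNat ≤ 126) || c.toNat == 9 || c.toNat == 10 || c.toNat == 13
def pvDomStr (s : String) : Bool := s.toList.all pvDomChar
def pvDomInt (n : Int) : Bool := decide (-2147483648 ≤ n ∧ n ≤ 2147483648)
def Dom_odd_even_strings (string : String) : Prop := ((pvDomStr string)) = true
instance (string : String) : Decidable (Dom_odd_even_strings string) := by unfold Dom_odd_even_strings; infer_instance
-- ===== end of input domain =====

-- B toggles a parity set in one pass instead of building a Counter and classifying its items; same return value (idiomatic, not faster).

-- ===== PORT A =====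
def odd_even_strings (string : String) : String :=
  let cnt_items := (PySem.Dict.counter string.toList).items
  let checks : Int × Int := cnt_items.foldl (fun st item =>
      if PySem.Int.mod item.2 2 = 0 then (st.1 + 1, st.2)
      else if PySem.Int.mod item.2 2 = 1 then (st.1, st.2 + 1)
      else st) (0, 0)
  if checks.1 > 0 ∧ checks.2 = 0 then "0"
  else if checks.1 = 0 ∧ checks.2 > 0 then "1"
  else "0/1"

-- ===== PORT B =====
def odd_even_strings_alt (string : String) : String :=
  let odd : PySem.Set Char := string.toList.foldl (fun s c =>
      if PySem.Set.contains s c then PySem.Set.discard s c else PySem.Set.add s c)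
    PySem.Set.empty
  let distinct : PySem.Set Char := PySem.Set.ofList string.toList
  if distinct ≠ [] ∧ odd = [] then "0"
  else if distinct ≠ [] ∧ PySem.Set.equal odd distinct then "1"
  else "0/1"

-- ===== PRECONDITION & SPEC =====
def Spec_odd_even_strings (string : String) (out : String) : Prop := out = odd_even_strings_alt string
instance (string : String) (out : String) : Decidable (Spec_odd_even_strings string out) := by unfold Spec_odd_even_strings; infer_instance

-- ===== CLAIM (what is proved, stated in full; the proofs are below) =====
def Claim_equal_odd_even_strings : Prop := ∀ (string : String), Dom_odd_even_strings string → Spec_odd_even_strings string (odd_even_strings string)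

-- ===== LEMMAS AND PROOFS =====

-- B's toggle loop: membership in the accumulated set is parity of the count so far, xor'd with the start set.
theorem toggle_mem (l : List Char) : ∀ (s : PySem.Set Char) (c : Char),
    (c ∈ l.foldl (fun s c =>
      if PySem.Set.contains s c then PySem.Set.discard s c else PySem.Set.add s c) s)
    ↔ (Xor' (c ∈ s) (Odd (l.count c))) := by
  induction l with
  | nil => intro s c; simp [Xor']
  | cons h t ih =>
    intro s c
    simp only [List.foldl_cons, ih]
    have hmem : (c ∈ (if PySem.Set.contains s h then PySem.Set.discard s h else PySem.Set.add s h))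
        ↔ (Xor' (c ∈ s) (c = h)) := by
      by_cases hms : h ∈ s <;> by_cases hc : c = h <;>
        simp_all [PySem.Set.mem_discard, PySem.Set.mem_add, PySem.Set.contains_iff,
          Xor', -PySem.Set.contains_eq_listContains]
    rw [hmem]
    by_cases hc : c = h
    · subst hc
      simp [List.count_cons, Xor', Nat.odd_add_one]
      tauto
    · simp [List.count_cons, if_neg (fun hh : h = c => hc hh.symm), Xor']
      tauto

-- A's classification loop counts even-count and odd-count keys.
theorem fold_checks (l : List Char) (ks : List Char) : ∀ (e o : Int),
    (ks.map (fun k => (k, (l.count k : Int)))).foldl (fun (st : Int × Int) item =>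
      if PySem.Int.mod item.2 2 = 0 then (st.1 + 1, st.2)
      else if PySem.Int.mod item.2 2 = 1 then (st.1, st.2 + 1)
      else st) (e, o)
    = (e + (ks.countP (fun k => l.count k % 2 = 0) : Int),
       o + (ks.countP (fun k => ¬ (l.count k % 2 = 0)) : Int)) := by
  induction ks with
  | nil => intro e o; simp
  | cons k t ih =>
    intro e o
    have hmod : PySem.Int.mod (l.count k : Int) 2 = ((l.count k % 2 : Nat) : Int) := by
      exact_mod_cast PySem.Int.mod_natCast (l.count k) 2
    rw [List.map_cons, List.foldl_cons]
    simp only [hmod]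
    by_cases hk : l.count k % 2 = 0
    · rw [if_pos (by exact_mod_cast hk), ih]
      simp [List.countP_cons, hk, Prod.ext_iff]
      omega
    · have hk1 : l.count k % 2 = 1 := by omega
      rw [if_neg (fun hc => hk (by exact_mod_cast hc)), if_pos (by exact_mod_cast hk1), ih]
      simp [List.countP_cons, hk, Prod.ext_iff]
      omega

theorem odd_even_strings_spec : Claim_equal_odd_even_strings := by
  intro string _
  unfold Spec_odd_even_strings odd_even_strings odd_even_strings_alt
  simp only [PySem.Dict.items_counter]
  rw [fold_checks string.toList (PySem.Set.ofList string.toList)]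
  set l := string.toList with hl
  set d := PySem.Set.ofList l with hd
  set od := l.foldl (fun s c =>
    if PySem.Set.contains s c then PySem.Set.discard s c else PySem.Set.add s c)
    PySem.Set.empty with hod
  have hmemodd : ∀ c : Char, c ∈ od ↔ Odd (l.count c) := by
    intro c; rw [hod, toggle_mem]; simp [PySem.Set.empty, Xor']
  have hco : (d.countP (fun k => ¬ (l.count k % 2 = 0)) = 0) ↔ od = [] := by
    rw [List.countP_eq_zero, List.eq_nil_iff_forall_not_mem]
    constructor
    · intro h c hc
      have hodd := (hmemodd c).mp hc
      have hcl : c ∈ d := (PySem.Set.mem_ofList l c).mpr (List.count_pos_iff.mp hodd.pos)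
      have := h c hcl
      simp [Nat.odd_iff] at hodd this
      omega
    · intro h k _
      have := fun hh => h k ((hmemodd k).mpr hh)
      simp only [decide_eq_true_eq, Nat.odd_iff] at this ⊢
      intro hne; exact this (by omega)
  have hsum : d.countP (fun k => l.count k % 2 = 0)
      + d.countP (fun k => ¬ (l.count k % 2 = 0)) = d.length := by
    simpa using (List.length_eq_countP_add_countP (fun k => decide (l.count k % 2 = 0)) (l := d)).symm
  have hce : (d.countP (fun k => l.count k % 2 = 0) = 0) ↔
      (∀ k ∈ d, ¬ (l.count k % 2 = 0)) := by
    rw [List.countP_eq_zero]; simp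
  have hequal : (PySem.Set.equal od d = true) ↔ (∀ k ∈ d, ¬ (l.count k % 2 = 0)) := by
    rw [PySem.Set.equal_iff]
    constructor
    · intro h k hk
      have := (h k).mpr hk
      rw [hmemodd, Nat.odd_iff] at this
      omega
    · intro h c
      rw [hmemodd]
      constructor
      · intro hodd
        exact (PySem.Set.mem_ofList l c).mpr (List.count_pos_iff.mp hodd.pos)
      · intro hc
        have := h c hc
        rw [Nat.odd_iff]; omega
  have hdne : (d ≠ []) ↔ 0 < d.length := by cases d <;> simp
  have hA1 : ((0:Int) + (d.countP (fun k => l.count k % 2 = 0) : Int) > 0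
      ∧ (0:Int) + (d.countP (fun k => ¬ (l.count k % 2 = 0)) : Int) = 0)
      ↔ (d ≠ [] ∧ od = []) := by
    rw [← hco, hdne]
    constructor <;> intro ⟨h1, h2⟩ <;> constructor <;> push_cast at * <;> omega
  have hA2 : ((0:Int) + (d.countP (fun k => l.count k % 2 = 0) : Int) = 0
      ∧ (0:Int) + (d.countP (fun k => ¬ (l.count k % 2 = 0)) : Int) > 0)
      ↔ (d ≠ [] ∧ PySem.Set.equal od d = true) := by
    rw [hequal, ← hce, hdne]
    constructor <;> intro ⟨h1, h2⟩ <;> constructor <;> push_cast at * <;> omega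
  by_cases h1 : d ≠ [] ∧ od = []
  · rw [if_pos (hA1.mpr h1), if_pos h1]
  · rw [if_neg (fun hh => h1 (hA1.mp hh)), if_neg h1]
    by_cases h2 : d ≠ [] ∧ PySem.Set.equal od d = true
    · rw [if_pos (hA2.mpr h2), if_pos h2]
    · rw [if_neg (fun hh => h2 (hA2.mp hh)), if_neg h2]
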